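/- GENERATED by tools/from_farm_form.py from farm.toyh/worked/_start/Proof.lean (a worked proof of the farm's unit `_start`,
   accepted by the verdict) — do not edit. -/
import Toyh.Spec.Units.start
import ProgX.Base.Spec.Stub

/-!
  The stub `_start`, for the heap toy, FROM THE GENERIC THEOREM `ProgX.Base.Top.stub_reaches` (ProgX/Base/Spec/Stub.lean): what is
  left to a program is the precondition of its `prog_main` from `ProgX.Base.Top.MainPre`, and three closed facts about its globals.
  `prog_main` is entered with the EMPTY heap `Heap.empty 0x800000 0xC00000`, the registered globals, IN and OUT as the other live
  objects, and no protected frame.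
-/

open X86 X86.User Asan ProgX.Base

namespace Toyh.Spec.Proved.start
open Toyh.Spec.start (Statement)

/-- **`prog_main`'s precondition at the stub's call** (0x100035), from what the generic stub theorem gives of that state: the
heap's common precondition for the empty heap (`Top.mainPre_heapPre`); `len ≤ 1FF000H`; the input is IN (`len` bytes at 200000H), a
live object of the list `(Heap.empty …).liveObjs ++ rest = rest`. -/
theorem start_main_pre_w (len : Nat) (v : State) (h : Top.MainPre Toyh.Globals.objs len v) :
    (Toyh.Spec.prog_main.spec (Heap.empty 0x800000 0xC00000) (Toyh.Globals.objs ++ initialObjs len) []).pre v := by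
  have hlen := h.len_le
  have e_rsi := h.rsi_toNat
  refine ⟨Top.mainPre_heapPre h, ?_, ?_⟩
  · -- len ≤ 1FF000H
    rw [e_rsi]
    exact hlen
  · -- the input: `len` bytes at 200000H
    right
    rw [e_rsi, h.rdi]
    exact Top.mainPre_live_in _ len

/-- `prog_main`'s 112 bytes of stack fit below the stub's `call` (FFFF8H bytes). -/
theorem start_main_frame_w (len : Nat) :
    (Toyh.Spec.prog_main.spec (Heap.empty 0x800000 0xC00000) (Toyh.Globals.objs ++ initialObjs len) []).frame ≤ 0xFFFF8 := by
  show 112 ≤ 0xFFFF8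
  decide

end Toyh.Spec.Proved.start

/-- The stub `_start` reaches `prog_exit`, for the heap toy: the generic theorem, at the program's runtime record and `prog_main`'s
contract for the empty heap, the objects `Toyh.Globals.objs ++ initialObjs len` and no protected frame. The three closed facts about
the globals: none lies in the text, all end below the heap's region (`Top.globals_below_heap`), the descriptor table is in the image's data. -/
theorem Toyh.Spec.Proved.start_ok : Toyh.Spec.start.Statement := by
  intro Lay hLay μ hμ u₀ hcode h_rc h_pm
  exact Top.stub_reaches hLay hμ hcode Toyh.Spec.rt rfl Toyh.Globals.objs (by decide)
    (Top.globals_below_heap _ Toyh.Globals.descs_ok) (by decide)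
    (fun len => Toyh.Spec.prog_main.spec (Heap.empty 0x800000 0xC00000) (Toyh.Globals.objs ++ initialObjs len) [])
    Toyh.Spec.Proved.start.start_main_frame_w Toyh.Spec.Proved.start.start_main_pre_w h_rc (fun len => h_pm _ _ _)
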